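-- pv_equiv track=rewrite | github.com/Zhiyuan-Jiao/leetcode-notes | 484 Find Permutation.py | findPermutation
-- ===== SOURCE A (Python) =====
-- from typing import List
--
-- def findPermutation(s: str) -> List[int]:
--     # Initialize an empty stack and a result list
--     stack = []
--     res = []
--
--     # Append 'I' to the end of the string to handle the last part of the sequence
--     s += 'I'
--
--     # Iterate over each character in the modified string
--     for i in range(len(s)):
--         # Push the current index (1-based) onto the stack
--         stack.append(i + 1)
--
--         # When we encounter 'I', pop all elements from the stack and add them to the result
--         if s[i] == 'I':
--             while stack:
--                 res.append(stack.pop())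
--
--     # Return the formed permutation
--     return res
-- ===== SOURCE B (Python) =====
-- def findPermutation(s: str) -> list:
--     # Start from the identity permutation 1..n and reverse each maximal
--     # run of non-'I' characters' segment in place (a run of k such chars
--     # spans k+1 array positions).
--     n = len(s) + 1
--     res = list(range(1, n + 1))
--     i = 0
--     while i < len(s):
--         if s[i] != 'I':
--             j = i
--             while j < len(s) and s[j] != 'I':
--                 j += 1
--             res[i:j + 1] = res[i:j + 1][::-1]
--             i = j
--         else:
--             i += 1
--     return res
-- ===== Notes on version B (the rewrite author's own statement) =====
-- stated objective: alternative
-- what changed: Replaces A's append-string-and-pop-a-stack scan by starting from the identity permutation 1..n+1 and reversing, in place, the segment spanned by each maximal run of non-'I' characters.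
import Mathlib
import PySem

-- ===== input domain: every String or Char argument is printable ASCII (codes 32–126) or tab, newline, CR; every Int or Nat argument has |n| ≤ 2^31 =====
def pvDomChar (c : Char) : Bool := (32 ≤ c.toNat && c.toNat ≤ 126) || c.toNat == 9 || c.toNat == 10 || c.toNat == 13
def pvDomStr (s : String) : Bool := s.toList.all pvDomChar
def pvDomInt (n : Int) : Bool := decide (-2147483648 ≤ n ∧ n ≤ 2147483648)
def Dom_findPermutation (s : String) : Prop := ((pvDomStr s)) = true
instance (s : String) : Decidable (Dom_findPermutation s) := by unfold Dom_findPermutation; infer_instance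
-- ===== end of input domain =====

-- B replaces A's stack push/pop machinery by reversing, inside the identity
-- permutation 1..n+1, the segment spanned by each maximal run of non-'I'
-- characters (alternative algorithm, same linear cost).

-- ===== PORT A =====
-- one step of A's loop body; state = (stack, res); Python's stack.append is ++ [x],
-- and the inner `while stack: res.append(stack.pop())` empties the stack from its
-- end, i.e. appends stack.reverse to res.
def pvAStep (st : List Int × List Int) (ic : Int × Char) : List Int × List Int :=
  let stack := st.1 ++ [ic.1 + 1]
  if ic.2 = 'I' then ([], st.2 ++ stack.reverse) else (stack, st.2)

-- `for i in range(len(s)): … s[i] …` over s += 'I' is the fold over enumerate(s+'I')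
def findPermutation (s : String) : List Int :=
  ((PySem.List.enumerate (s ++ "I").toList 0).foldl pvAStep ([], [])).2

-- ===== PORT B =====
-- inner `while j < len(s) and s[j] != 'I': j += 1`; List.getD is exact here since
-- the access is guarded by j < length
def pvFindJ (cs : List Char) (j : Nat) : Nat :=
  if h : j < cs.length ∧ cs.getD j ' ' ≠ 'I' then pvFindJ cs (j + 1) else j
termination_by cs.length - j
decreasing_by omega

lemma pvFindJ_ge (cs : List Char) (j : Nat) : j ≤ pvFindJ cs j := by
  unfold pvFindJ
  split
  · exact Nat.le_trans (Nat.le_succ j) (pvFindJ_ge cs (j + 1))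
  · exact Nat.le_refl j
termination_by cs.length - j
decreasing_by omega

-- outer `while i < len(s)` loop; the slice assignment
-- `res[i:j+1] = res[i:j+1][::-1]` is take/reverse/drop with the natural bounds
-- 0 ≤ i ≤ j + 1, where it is exact
def pvBLoop (cs : List Char) (res : List Int) (i : Nat) : List Int :=
  if h : i < cs.length then
    if hc : cs.getD i ' ' ≠ 'I' then
      pvBLoop cs
        (res.take i ++ ((res.drop i).take (pvFindJ cs i + 1 - i)).reverse
          ++ res.drop (pvFindJ cs i + 1))
        (pvFindJ cs i)
    else pvBLoop cs res (i + 1)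
  else res
termination_by cs.length - i
decreasing_by
  · have h1 : pvFindJ cs i = pvFindJ cs (i + 1) := by
      rw [pvFindJ, dif_pos ⟨h, hc⟩]
    have h2 := pvFindJ_ge cs (i + 1)
    omega
  · omega

-- n = len(s) + 1; res = list(range(1, n + 1))
def findPermutation_alt (s : String) : List Int :=
  pvBLoop s.toList (PySem.List.pyRange 1 ((s.length : Int) + 2) 1) 0

-- ===== PRECONDITION & SPEC =====
def Spec_findPermutation (s : String) (out : List Int) : Prop := out = findPermutation_alt s
instance (s : String) (out : List Int) : Decidable (Spec_findPermutation s out) := by unfold Spec_findPermutation; infer_instance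

-- ===== CLAIM (what is proved, stated in full; the proofs are below) =====
def Claim_equal_findPermutation : Prop := ∀ (s : String), Dom_findPermutation s → Spec_findPermutation s (findPermutation s)

-- ===== LEMMAS AND PROOFS =====

-- [v, v+1, …, v+k-1]
def pvAsc : Int → Nat → List Int
  | _, 0 => []
  | v, k + 1 => v :: pvAsc (v + 1) k

@[simp] lemma pvAsc_length (v : Int) (k : Nat) : (pvAsc v k).length = k := by
  induction k generalizing v with
  | zero => rfl
  | succ k ih => simp [pvAsc, ih]

lemma pvAsc_append (v : Int) (a b : Nat) :
    pvAsc v (a + b) = pvAsc v a ++ pvAsc (v + a) b := by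
  induction a generalizing v with
  | zero => simp [pvAsc]
  | succ a ih =>
      have h : a + 1 + b = (a + b) + 1 := by omega
      rw [h]
      simp only [pvAsc, ih (v + 1)]
      have : v + 1 + (a : Int) = v + (↑a + 1) := by ring
      simp [this]

-- the remaining-blocks reference function: pvRef cs off stack is what A's loop
-- appends to res when run over the rest cs of the string from offset off
def pvRef : List Char → Int → List Int → List Int
  | [], _, _ => []
  | c :: cs, off, stack =>
    if c = 'I' then (stack ++ [off + 1]).reverse ++ pvRef cs (off + 1) []
    else pvRef cs (off + 1) (stack ++ [off + 1])

def pvRest : List Char → Int → List Int → List Int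
  | [], _, stack => stack
  | c :: cs, off, stack =>
    if c = 'I' then pvRest cs (off + 1) []
    else pvRest cs (off + 1) (stack ++ [off + 1])

lemma pvA_foldl (cs : List Char) :
    ∀ (off : Int) (stack res : List Int),
      (PySem.List.enumerate cs off).foldl pvAStep (stack, res)
        = (pvRest cs off stack, res ++ pvRef cs off stack) := by
  induction cs with
  | nil => intro off stack res; simp [PySem.List.enumerate, pvRef, pvRest]
  | cons c cs ih =>
      intro off stack res
      rw [PySem.List.enumerate_cons]
      simp only [List.foldl_cons]
      by_cases hc : c = 'I'
      · simp [pvAStep, hc, ih, pvRef, pvRest]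
      · simp [pvAStep, hc, ih, pvRef, pvRest]

lemma pvRef_run (d : List Char) :
    ∀ (rest : List Char) (off : Int) (stack : List Int),
      (∀ c ∈ d, c ≠ 'I') →
      pvRef (d ++ 'I' :: rest) off stack
        = (stack ++ pvAsc (off + 1) (d.length + 1)).reverse
            ++ pvRef rest (off + (d.length : Int) + 1) [] := by
  induction d with
  | nil => intro rest off stack _; simp [pvRef, pvAsc]
  | cons c d ih =>
      intro rest off stack hall
      have hc : c ≠ 'I' := hall c (by simp)
      simp only [List.cons_append, pvRef, hc]
      rw [ih rest (off + 1) (stack ++ [off + 1]) (fun x hx => hall x (by simp [hx]))]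
      have hstack : stack ++ [off + 1] ++ pvAsc (off + 1 + 1) (d.length + 1)
          = stack ++ pvAsc (off + 1) ((c :: d).length + 1) := by
        simp only [List.length_cons]
        rw [show pvAsc (off + 1) (d.length + 1 + 1)
              = (off + 1) :: pvAsc (off + 1 + 1) (d.length + 1) from rfl]
        simp
      have hoff : off + 1 + (d.length : Int) + 1 = off + (((c :: d).length : Nat) : Int) + 1 := by
        simp only [List.length_cons]; push_cast; ring
      rw [hstack, hoff]
      simp
  
lemma pvFindJ_exit (cs : List Char) (i : Nat) :
    ¬ (pvFindJ cs i < cs.length ∧ cs.getD (pvFindJ cs i) ' ' ≠ 'I') := by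
  unfold pvFindJ
  split
  · exact pvFindJ_exit cs (i + 1)
  · assumption
termination_by cs.length - i
decreasing_by omega

lemma pvFindJ_le (cs : List Char) (i : Nat) (h : i ≤ cs.length) :
    pvFindJ cs i ≤ cs.length := by
  unfold pvFindJ
  split
  · exact pvFindJ_le cs (i + 1) (by rename_i h'; omega)
  · exact h
termination_by cs.length - i
decreasing_by omega

lemma pvFindJ_run (cs : List Char) (i : Nat) :
    ∀ t, i ≤ t → t < pvFindJ cs i → cs.getD t ' ' ≠ 'I' := by
  intro t h1 h2
  rw [pvFindJ] at h2
  split at h2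
  · rename_i hcond
    rcases Nat.eq_or_lt_of_le h1 with he | hlt
    · exact he ▸ hcond.2
    · exact pvFindJ_run cs (i + 1) t hlt h2
  · omega
termination_by cs.length - i
decreasing_by omega

lemma pvFindJ_succ (cs : List Char) (i : Nat) (h : i < cs.length)
    (hc : cs.getD i ' ' ≠ 'I') : pvFindJ cs i = pvFindJ cs (i + 1) := by
  rw [pvFindJ, dif_pos ⟨h, hc⟩]

-- main B-side lemma: pvBLoop, entered at a block start i with the suffix of res
-- still the identity, produces exactly the reference blocks
lemma pvBLoop_eq (cs : List Char) (n : Nat) :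
    ∀ (i : Nat) (pre : List Int), cs.length - i ≤ n → i ≤ cs.length → pre.length = i →
      pvBLoop cs (pre ++ pvAsc ((i : Int) + 1) (cs.length + 1 - i)) i
        = pre ++ pvRef ((cs ++ ['I']).drop i) (i : Int) [] := by
  induction n with
  | zero =>
      intro i pre hn hi hpre
      have hie : i = cs.length := by omega
      subst hie
      rw [pvBLoop]
      simp only [lt_self_iff_false, dite_false]
      simp [pvRef, pvAsc]
  | succ n ih =>
      intro i pre hn hi hpre
      rcases Nat.eq_or_lt_of_le hi with hie | hilt
      · subst hie
        rw [pvBLoop]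
        simp only [lt_self_iff_false, dite_false]
        simp [pvRef, pvAsc]
      · have hdropI : (cs ++ ['I']).drop i = cs.getD i ' ' :: (cs ++ ['I']).drop (i + 1) → True := fun _ => trivial
        by_cases hc : cs.getD i ' ' = 'I'
        · -- 'I' step: skip one position, the suffix stays the identity
          rw [pvBLoop, dif_pos hilt, dif_neg (not_not_intro hc)]
          have hsplit : pvAsc ((i : Int) + 1) (cs.length + 1 - i)
              = ((i : Int) + 1) :: pvAsc (((i + 1 : Nat) : Int) + 1) (cs.length + 1 - (i + 1)) := by
            rw [show cs.length + 1 - i = (cs.length + 1 - (i + 1)) + 1 by omega]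
            have : ((i : Int) + 1) + 1 = ((i + 1 : Nat) : Int) + 1 := by push_cast; ring
            rw [pvAsc, this]
          rw [hsplit, List.append_cons]
          rw [ih (i + 1) (pre ++ [(i : Int) + 1]) (by omega) (by omega) (by simp [hpre])]
          have hi' : i < (cs ++ ['I']).length := by simp; omega
          have hgi : (cs ++ ['I'])[i]'hi' = 'I' := by
            rw [List.getElem_append_left hilt]
            rw [← List.getD_eq_getElem cs ' ' hilt]
            exact hc
          rw [show (cs ++ ['I']).drop i = (cs ++ ['I'])[i]'hi' :: (cs ++ ['I']).drop (i + 1)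
                from List.drop_eq_getElem_cons hi', hgi]
          simp [pvRef]
        · -- run of non-'I' characters: one reversal jumps to its end j
          rw [pvBLoop, dif_pos hilt, dif_pos hc]
          set j := pvFindJ cs i with hjdef
          have hj1 : i + 1 ≤ j := by
            rw [hjdef, pvFindJ_succ cs i hilt hc]; exact pvFindJ_ge cs (i + 1)
          have hj2 : j ≤ cs.length := pvFindJ_le cs i (by omega)
          -- decompose the identity suffix
          set k := j + 1 - i with hkdef
          have hksplit : cs.length + 1 - i = k + (cs.length - j) := by omega
          set A1 := pvAsc ((i : Int) + 1) k with hA1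
          set A2 := pvAsc ((j : Int) + 2) (cs.length - j) with hA2
          have hasc : pvAsc ((i : Int) + 1) (cs.length + 1 - i) = A1 ++ A2 := by
            rw [hksplit, pvAsc_append, hA1, hA2]
            have : (i : Int) + 1 + (k : Nat) = (j : Int) + 2 := by omega
            rw [this]
          have hA1len : A1.length = k := by simp [hA1]
          -- compute the three slice pieces
          have htake : (pre ++ pvAsc ((i : Int) + 1) (cs.length + 1 - i)).take i = pre :=
            List.take_left' hpre
          have hdrop : (pre ++ pvAsc ((i : Int) + 1) (cs.length + 1 - i)).drop i
              = A1 ++ A2 := by rw [List.drop_left' hpre, hasc]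
          have htake2 : ((A1 ++ A2)).take k = A1 :=
            List.take_left' (by rw [hA1len])
          have hdrop2 : (pre ++ pvAsc ((i : Int) + 1) (cs.length + 1 - i)).drop (j + 1)
              = A2 := by
            rw [hasc, ← List.append_assoc]
            exact List.drop_left' (by simp [hpre, hA1len]; omega)
          rw [htake, hdrop, htake2, hdrop2]
          -- the reference side: split off the first block
          have hjl : j < (cs ++ ['I']).length := by simp; omega
          have hlj : (cs ++ ['I'])[j]'hjl = 'I' := by
            rcases Nat.lt_or_ge j cs.length with hlt | hge
            · rw [List.getElem_append_left hlt, ← List.getD_eq_getElem cs ' ' hlt]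
              have := pvFindJ_exit cs i
              rw [← hjdef] at this
              by_contra hne
              exact this ⟨hlt, hne⟩
            · rw [List.getElem_append_right (by omega)]
              have hj : j = cs.length := by omega
              simp [hj]
          set d := ((cs ++ ['I']).drop i).take (j - i) with hddef
          have hdlen : d.length = j - i := by
            simp [hddef]; omega
          have hdall : ∀ c ∈ d, c ≠ 'I' := by
            intro c hcmem
            obtain ⟨t, ht, hdt⟩ := List.getElem_of_mem hcmem
            have ht' : t < j - i := by rwa [hdlen] at ht
            have hit : i + t < cs.length := by omega
            have h9 : (((cs ++ ['I']).drop i).take (j - i))[t]? = some c := by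
              rw [← hddef, List.getElem?_eq_getElem ht, hdt]
            have h10 : (cs ++ ['I'])[i + t]? = some c := by
              simpa [List.getElem?_take, ht', List.getElem?_drop] using h9
            have h11 : (cs ++ ['I'])[i + t]? = cs[i + t]? := by
              rw [List.getElem?_append_left (by omega)]
            have h12 : c = cs.getD (i + t) ' ' := by
              rw [h11, List.getElem?_eq_getElem hit] at h10
              rw [List.getD_eq_getElem cs ' ' hit]
              exact (Option.some_injective _ h10).symm
            rw [h12]
            exact pvFindJ_run cs i (i + t) (by omega) (by omega)
          have hdec : (cs ++ ['I']).drop i = d ++ 'I' :: (cs ++ ['I']).drop (j + 1) := by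
            conv_lhs => rw [← List.take_append_drop (j - i) ((cs ++ ['I']).drop i)]
            rw [← hddef, List.drop_drop]
            rw [show i + (j - i) = j by omega]
            rw [List.drop_eq_getElem_cons hjl, hlj]
          rw [hdec, pvRef_run d _ (i : Int) [] hdall]
          have hdk : d.length + 1 = k := by omega
          have hoff : (i : Int) + (d.length : Int) + 1 = ((j + 1 : Nat) : Int) := by
            rw [hdlen]; omega
          rw [hdk, hoff]
          simp only [List.nil_append, ← hA1]
          -- now finish by the two subcases on whether the run reaches the end
          rcases Nat.lt_or_ge j cs.length with hjlt | hjge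
          · -- s[j] = 'I': skip it and recurse at j + 1
            have hcj : cs.getD j ' ' = 'I' := by
              have := pvFindJ_exit cs i
              rw [← hjdef] at this
              by_contra hne
              exact this ⟨hjlt, hne⟩
            rw [pvBLoop, dif_pos hjlt, dif_neg (not_not_intro hcj)]
            have hA2' : A2 = pvAsc (((j + 1 : Nat) : Int) + 1) (cs.length + 1 - (j + 1)) := by
              rw [hA2, show ((j : Int) + 2) = (((j + 1 : Nat) : Int) + 1) by push_cast; ring,
                show cs.length - j = cs.length + 1 - (j + 1) by omega]
            have hres' : pre ++ A1.reverse ++ A2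
                = (pre ++ A1.reverse) ++ pvAsc (((j + 1 : Nat) : Int) + 1) (cs.length + 1 - (j + 1)) := by
              rw [← hA2']
            rw [hres']
            rw [ih (j + 1) (pre ++ A1.reverse) (by omega) (by omega) (by simp [hpre, hA1len]; omega)]
            simp
          · -- j = len: the run reaches the end; the loop exits
            have hje : j = cs.length := by omega
            rw [pvBLoop, dif_neg (by omega)]
            have h2 : A2 = [] := by rw [hA2, hje, Nat.sub_self]; rfl
            have h3 : (cs ++ ['I']).drop (j + 1) = [] := by
              apply List.drop_eq_nil_of_le; simp; omega
            rw [h2, h3]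
            simp [pvRef]

lemma pvAsc_eq_pyRange (k : Nat) : ∀ (v : Int), PySem.List.pyRange v (v + k) 1 = pvAsc v k := by
  induction k with
  | zero => intro v; simp [PySem.List.pyRange_one_eq_nil, pvAsc]
  | succ k ih =>
      intro v
      rw [PySem.List.pyRange_one_cons (by omega)]
      rw [show v + ((k : Nat) + 1 : Nat) = (v + 1) + (k : Nat) by push_cast; ring]
      rw [ih (v + 1)]
      rfl

-- ===== VERDICT (by name: the statement is the Claim_ definition above) =====
theorem findPermutation_spec : Claim_equal_findPermutation := by
  intro s _
  unfold Spec_findPermutation findPermutation findPermutation_alt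
  rw [pvA_foldl]
  have hcat : (s ++ "I").toList = s.toList ++ ['I'] := by
    simp [String.toList_append]
  have hlen : s.length = s.toList.length := String.length_toList.symm
  have hrange : PySem.List.pyRange 1 ((s.length : Int) + 2) 1 = pvAsc 1 (s.toList.length + 1) := by
    rw [show ((s.length : Int) + 2) = 1 + ((s.toList.length + 1 : Nat) : Int) by rw [hlen]; push_cast; ring]
    exact pvAsc_eq_pyRange (s.toList.length + 1) 1
  rw [hcat, hrange]
  have := pvBLoop_eq s.toList s.toList.length 0 [] (by omega) (by omega) rfl
  simp only [Nat.cast_zero, zero_add, Nat.sub_zero, List.nil_append, List.drop_zero] at this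
  rw [this]
  simp
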